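-- pv_equiv track=rewrite | github.com/davidtweedle/jax_gptq | src/jax_gptq/pallas/gpu_kernels.py | compact_panel_kernel_tile_cols
-- ===== SOURCE A (Python) =====
-- def compact_panel_kernel_tile_cols(n_cols: int, max_block_cols: int = 128) -> int:
--     block_cols = 1
--     while block_cols < n_cols:
--         block_cols *= 2
--     block_cols = min(block_cols, max_block_cols)
--     if block_cols < n_cols:
--         block_cols = max_block_cols
--     return block_cols
-- ===== SOURCE B (Python) =====
-- def compact_panel_kernel_tile_cols(n_cols: int, max_block_cols: int = 128) -> int:
--     p = 1 if n_cols <= 1 else 1 << (n_cols - 1).bit_length()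
--     return min(p, max_block_cols)
-- ===== Notes on version B (the rewrite author's own statement) =====
-- stated objective: idiomatic
-- what changed: Replaces the doubling while-loop with a closed-form smallest-power-of-two via bit_length and drops the redundant final if (its branch always coincides with the min).
import Mathlib
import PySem

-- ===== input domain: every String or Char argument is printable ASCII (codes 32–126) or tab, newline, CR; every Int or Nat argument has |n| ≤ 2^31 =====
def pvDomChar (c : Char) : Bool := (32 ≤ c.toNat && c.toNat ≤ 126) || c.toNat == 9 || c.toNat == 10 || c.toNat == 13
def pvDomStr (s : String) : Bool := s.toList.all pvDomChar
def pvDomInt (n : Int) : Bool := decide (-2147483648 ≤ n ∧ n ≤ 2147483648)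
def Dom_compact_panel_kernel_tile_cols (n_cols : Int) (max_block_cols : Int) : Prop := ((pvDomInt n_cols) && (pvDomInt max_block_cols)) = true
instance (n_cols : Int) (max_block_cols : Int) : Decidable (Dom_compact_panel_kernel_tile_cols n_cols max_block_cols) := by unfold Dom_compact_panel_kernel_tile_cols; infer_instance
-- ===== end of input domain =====

-- B computes the smallest power of two ≥ n_cols in closed form (bit_length) instead of
-- A's doubling loop, and drops A's redundant final `if` (objective: idiomatic).

-- ===== PORT A =====
-- the `while block_cols < n_cols: block_cols *= 2` loop, step for step
def pvTileLoopA (n_cols block_cols : Int) (hb : 0 < block_cols) : Int :=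
  if block_cols < n_cols then pvTileLoopA n_cols (block_cols * 2) (by omega) else block_cols
termination_by (n_cols - block_cols).toNat
decreasing_by omega

def compact_panel_kernel_tile_cols (n_cols : Int) (max_block_cols : Int) : Int :=
  let block_cols := pvTileLoopA n_cols 1 (by norm_num)
  let block_cols := min block_cols max_block_cols
  if block_cols < n_cols then max_block_cols else block_cols

-- ===== PORT B =====
-- `1 << (n_cols - 1).bit_length()` ported as 2 ^ Nat.size (Nat.size = Python's bit_length)
def compact_panel_kernel_tile_cols_alt (n_cols : Int) (max_block_cols : Int) : Int :=
  let p : Int := if n_cols ≤ 1 then 1 else 2 ^ Nat.size (n_cols - 1).toNat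
  min p max_block_cols

-- ===== PRECONDITION & SPEC =====
def Spec_compact_panel_kernel_tile_cols (n_cols : Int) (max_block_cols : Int) (out : Int) : Prop := out = compact_panel_kernel_tile_cols_alt n_cols max_block_cols
instance (n_cols : Int) (max_block_cols : Int) (out : Int) : Decidable (Spec_compact_panel_kernel_tile_cols n_cols max_block_cols out) := by unfold Spec_compact_panel_kernel_tile_cols; infer_instance

-- ===== CLAIM (what is proved, stated in full; the proofs are below) =====
def Claim_equal_compact_panel_kernel_tile_cols : Prop := ∀ (n_cols : Int) (max_block_cols : Int), Dom_compact_panel_kernel_tile_cols n_cols max_block_cols → Spec_compact_panel_kernel_tile_cols n_cols max_block_cols (compact_panel_kernel_tile_cols n_cols max_block_cols)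

-- ===== LEMMAS AND PROOFS =====

-- A's loop started at 2^k stabilises at 2^(max k (bit_length (n-1)))
theorem pvTileLoopA_pow (n_cols : Int) (hn : 2 ≤ n_cols) :
    ∀ (d k : Nat) (hb : 0 < (2:Int) ^ k),
      Nat.size (n_cols - 1).toNat - k = d →
      pvTileLoopA n_cols ((2:Int) ^ k) hb = 2 ^ (max k (Nat.size (n_cols - 1).toNat)) := by
  intro d
  induction d with
  | zero =>
    intro k hb hd
    have hks : Nat.size (n_cols - 1).toNat ≤ k := by omega
    have hlt : (n_cols - 1).toNat < 2 ^ k := Nat.size_le.mp (le_trans (le_refl _) hks)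
    have hlt' : n_cols - 1 < (2:Int) ^ k := by
      have : ((n_cols - 1).toNat : Int) = n_cols - 1 := by omega
      rw [← this]; exact_mod_cast hlt
    rw [pvTileLoopA]
    simp only [if_neg (by omega : ¬ (2:Int) ^ k < n_cols)]
    rw [max_eq_left hks]
  | succ d ih =>
    intro k hb hd
    have hks : k < Nat.size (n_cols - 1).toNat := by omega
    have hle : 2 ^ k ≤ (n_cols - 1).toNat := Nat.lt_size.mp hks
    have hle' : (2:Int) ^ k ≤ n_cols - 1 := by
      have h1 : ((n_cols - 1).toNat : Int) = n_cols - 1 := by omega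
      calc (2:Int) ^ k = ((2 ^ k : Nat) : Int) := by push_cast; ring
        _ ≤ ((n_cols - 1).toNat : Int) := by exact_mod_cast hle
        _ = n_cols - 1 := h1
    rw [pvTileLoopA]
    simp only [if_pos (by omega : (2:Int) ^ k < n_cols)]
    have h2 : (2:Int) ^ k * 2 = (2:Int) ^ (k + 1) := by ring
    have := ih (k + 1) (by positivity) (by omega)
    simp only [h2]
    rw [this, max_eq_right (le_of_lt hks), max_eq_right hks]

-- the loop result is the closed-form power p, and p ≥ n_cols
theorem pvLoop_eq_p (n_cols : Int) (hb : (0:Int) < 1) :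
    pvTileLoopA n_cols 1 hb
      = (if n_cols ≤ 1 then (1:Int) else 2 ^ Nat.size (n_cols - 1).toNat) := by
  by_cases h : n_cols ≤ 1
  · rw [pvTileLoopA]
    simp [h, if_neg (by omega : ¬ (1:Int) < n_cols)]
  · have hn : 2 ≤ n_cols := by omega
    have h1 : (1:Int) = 2 ^ (0:Nat) := by norm_num
    have := pvTileLoopA_pow n_cols hn (Nat.size (n_cols - 1).toNat) 0 (by norm_num) (by omega)
    simp only [pow_zero] at this
    rw [this, Nat.max_eq_right (Nat.zero_le _), if_neg h]

theorem pvP_ge (n_cols : Int) :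
    n_cols ≤ (if n_cols ≤ 1 then (1:Int) else 2 ^ Nat.size (n_cols - 1).toNat) := by
  by_cases h : n_cols ≤ 1
  · simp [h]
  · have hlt : (n_cols - 1).toNat < 2 ^ Nat.size (n_cols - 1).toNat := Nat.lt_size_self _
    have hlt' : n_cols - 1 < (2:Int) ^ Nat.size (n_cols - 1).toNat := by
      have h1 : ((n_cols - 1).toNat : Int) = n_cols - 1 := by omega
      calc n_cols - 1 = ((n_cols - 1).toNat : Int) := h1.symm
        _ < ((2 ^ Nat.size (n_cols - 1).toNat : Nat) : Int) := by exact_mod_cast hlt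
        _ = (2:Int) ^ Nat.size (n_cols - 1).toNat := by push_cast; ring
    rw [if_neg h]; omega

-- ===== VERDICT (by name: the statement is the Claim_ definition above) =====
theorem compact_panel_kernel_tile_cols_spec : Claim_equal_compact_panel_kernel_tile_cols := by
  intro n m _
  unfold Spec_compact_panel_kernel_tile_cols compact_panel_kernel_tile_cols
    compact_panel_kernel_tile_cols_alt
  simp only
  rw [pvLoop_eq_p n (by norm_num)]
  have hge := pvP_ge n
  set p := (if n ≤ 1 then (1:Int) else 2 ^ Nat.size (n - 1).toNat) with hp
  omega
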